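-- pv_equiv track=rewrite | github.com/fafactx/mcu-code-analyzer | mcu_code_analyzer/intelligence/semantic_analyzer.py | _group_functions_by_purpose
-- ===== SOURCE A (Python) =====
-- from typing import Dict, List, Set, Tuple, Optional
--
-- def _group_functions_by_purpose(functions: Dict) -> Dict[str, List[str]]:
--     """按用途分组函数"""
--     groups = {
--         'initialization': [],
--         'configuration': [],
--         'communication': [],
--         'control': [],
--         'data_processing': [],
--         'interrupt_handling': [],
--         'utility': []
--     }
--
--     for func_name in functions.keys():
--         func_lower = func_name.lower()
--
--         if any(keyword in func_lower for keyword in ['init', 'setup', 'begin']):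
--             groups['initialization'].append(func_name)
--         elif any(keyword in func_lower for keyword in ['config', 'set', 'configure']):
--             groups['configuration'].append(func_name)
--         elif any(keyword in func_lower for keyword in ['send', 'receive', 'transmit', 'uart', 'spi', 'i2c']):
--             groups['communication'].append(func_name)
--         elif any(keyword in func_lower for keyword in ['control', 'start', 'stop', 'enable', 'disable']):
--             groups['control'].append(func_name)
--         elif any(keyword in func_lower for keyword in ['process', 'calculate', 'convert', 'filter']):
--             groups['data_processing'].append(func_name)
--         elif any(keyword in func_lower for keyword in ['irq', 'handler', 'isr', 'interrupt']):
--             groups['interrupt_handling'].append(func_name)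
--         else:
--             groups['utility'].append(func_name)
--
--     # 移除空组
--     return {k: v for k, v in groups.items() if v}
-- ===== SOURCE B (Python) =====
-- def _group_functions_by_purpose(functions):
--     """Group function names by purpose, driven by an ordered rule table."""
--     RULES = [
--         ('initialization', ['init', 'setup', 'begin']),
--         ('configuration', ['config', 'set', 'configure']),
--         ('communication', ['send', 'receive', 'transmit', 'uart', 'spi', 'i2c']),
--         ('control', ['control', 'start', 'stop', 'enable', 'disable']),
--         ('data_processing', ['process', 'calculate', 'convert', 'filter']),
--         ('interrupt_handling', ['irq', 'handler', 'isr', 'interrupt']),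
--     ]
--
--     def label(name):
--         low = name.lower()
--         for key, kws in RULES:
--             if any(kw in low for kw in kws):
--                 return key
--         return 'utility'
--
--     names = list(functions)
--     result = {}
--     for key in [k for k, _ in RULES] + ['utility']:
--         members = [n for n in names if label(n) == key]
--         if members:
--             result[key] = members
--     return result
-- ===== Notes on version B (the rewrite author's own statement) =====
-- stated objective: alternative
-- what changed: Replaces A's single pass with a 7-way if/elif cascade appending into a mutable groups dict (then dropping empty groups) by an ordered rule table with a label() lookup and a per-group pass that collects each group's members directly, keeping only nonempty groups as it builds the result.
import Mathlib
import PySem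

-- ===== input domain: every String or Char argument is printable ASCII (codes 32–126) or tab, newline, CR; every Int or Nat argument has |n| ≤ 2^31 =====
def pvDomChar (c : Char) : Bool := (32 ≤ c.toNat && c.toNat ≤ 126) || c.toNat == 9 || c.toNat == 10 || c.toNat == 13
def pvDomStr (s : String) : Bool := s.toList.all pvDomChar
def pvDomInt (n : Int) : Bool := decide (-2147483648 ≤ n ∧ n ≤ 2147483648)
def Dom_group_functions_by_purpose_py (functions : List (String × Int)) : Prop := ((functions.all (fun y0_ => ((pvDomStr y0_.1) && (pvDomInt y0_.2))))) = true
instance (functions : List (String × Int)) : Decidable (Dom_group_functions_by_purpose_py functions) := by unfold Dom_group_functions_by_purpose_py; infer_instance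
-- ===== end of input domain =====

-- B replaces A's if/elif cascade with an ordered rule table and builds the result per group
-- (one pass over the names for each group key) instead of a single dict-appending pass: alternative decomposition, same cost class.


-- ===== PORT A =====
-- the loop body of A: the if/elif cascade appending func_name to the chosen group
def pvAStep (groups : PySem.Dict String (List String)) (funcName : String) : PySem.Dict String (List String) :=
  let funcLower := PySem.Str.lower funcName
  if ["init", "setup", "begin"].any (fun kw => PySem.Str.isIn kw funcLower) then
    PySem.Dict.modify groups "initialization" [] (· ++ [funcName])
  else if ["config", "set", "configure"].any (fun kw => PySem.Str.isIn kw funcLower) then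
    PySem.Dict.modify groups "configuration" [] (· ++ [funcName])
  else if ["send", "receive", "transmit", "uart", "spi", "i2c"].any (fun kw => PySem.Str.isIn kw funcLower) then
    PySem.Dict.modify groups "communication" [] (· ++ [funcName])
  else if ["control", "start", "stop", "enable", "disable"].any (fun kw => PySem.Str.isIn kw funcLower) then
    PySem.Dict.modify groups "control" [] (· ++ [funcName])
  else if ["process", "calculate", "convert", "filter"].any (fun kw => PySem.Str.isIn kw funcLower) then
    PySem.Dict.modify groups "data_processing" [] (· ++ [funcName])
  else if ["irq", "handler", "isr", "interrupt"].any (fun kw => PySem.Str.isIn kw funcLower) then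
    PySem.Dict.modify groups "interrupt_handling" [] (· ++ [funcName])
  else
    PySem.Dict.modify groups "utility" [] (· ++ [funcName])

def group_functions_by_purpose_py (functions : List (String × Int)) : List (String × List String) :=
  let groups : PySem.Dict String (List String) := PySem.Dict.ofList
    [("initialization", []), ("configuration", []), ("communication", []), ("control", []),
     ("data_processing", []), ("interrupt_handling", []), ("utility", [])]
  let groups := ((PySem.Dict.ofList functions).keys).foldl pvAStep groups
  groups.items.filter (fun kv => !kv.2.isEmpty)

-- ===== PORT B =====
def pvRules : List (String × List String) :=
  [("initialization", ["init", "setup", "begin"]),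
   ("configuration", ["config", "set", "configure"]),
   ("communication", ["send", "receive", "transmit", "uart", "spi", "i2c"]),
   ("control", ["control", "start", "stop", "enable", "disable"]),
   ("data_processing", ["process", "calculate", "convert", "filter"]),
   ("interrupt_handling", ["irq", "handler", "isr", "interrupt"])]

-- B's label(name): first rule whose keyword list has a substring match, default 'utility'
def pvLabelGo (low : String) : List (String × List String) → String
  | [] => "utility"
  | (key, kws) :: rest => if kws.any (fun kw => PySem.Str.isIn kw low) then key else pvLabelGo low rest

def pvLabel (name : String) : String := pvLabelGo (PySem.Str.lower name) pvRules

def group_functions_by_purpose_py_alt (functions : List (String × Int)) : List (String × List String) :=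
  let names := (PySem.Dict.ofList functions).keys
  (pvRules.map (·.1) ++ ["utility"]).filterMap (fun key =>
    let members := names.filter (fun n => pvLabel n == key)
    if members.isEmpty then none else some (key, members))

-- ===== PRECONDITION & SPEC =====
def Spec_group_functions_by_purpose_py (functions : List (String × Int)) (out : List (String × List String)) : Prop := out = group_functions_by_purpose_py_alt functions
instance (functions : List (String × Int)) (out : List (String × List String)) : Decidable (Spec_group_functions_by_purpose_py functions out) := by unfold Spec_group_functions_by_purpose_py; infer_instance

-- ===== CLAIM (what is proved, stated in full; the proofs are below) =====
def Claim_equal_group_functions_by_purpose_py : Prop := ∀ (functions : List (String × Int)), Dom_group_functions_by_purpose_py functions → Spec_group_functions_by_purpose_py functions (group_functions_by_purpose_py functions)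

-- ===== LEMMAS AND PROOFS =====

-- A's cascade picks exactly B's label
theorem pvAStep_eq (d : PySem.Dict String (List String)) (n : String) :
    pvAStep d n = PySem.Dict.modify d (pvLabel n) [] (· ++ [n]) := by
  simp only [pvAStep, pvLabel, pvRules, pvLabelGo]
  split_ifs <;> rfl

theorem pvLabel_cases (n : String) :
    pvLabel n = "initialization" ∨ pvLabel n = "configuration" ∨ pvLabel n = "communication" ∨
    pvLabel n = "control" ∨ pvLabel n = "data_processing" ∨ pvLabel n = "interrupt_handling" ∨
    pvLabel n = "utility" := by
  simp only [pvLabel, pvRules, pvLabelGo]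
  split_ifs <;> simp

-- loop invariant: the fold with pvAStep distributes the names into the seven fixed buckets
theorem pv_fold_inv (names : List String) (v1 v2 v3 v4 v5 v6 v7 : List String) :
    names.foldl pvAStep (PySem.Dict.mk
      [("initialization", v1), ("configuration", v2), ("communication", v3), ("control", v4),
       ("data_processing", v5), ("interrupt_handling", v6), ("utility", v7)]) =
    PySem.Dict.mk
      [("initialization", v1 ++ names.filter (fun n => pvLabel n == "initialization")),
       ("configuration", v2 ++ names.filter (fun n => pvLabel n == "configuration")),
       ("communication", v3 ++ names.filter (fun n => pvLabel n == "communication")),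
       ("control", v4 ++ names.filter (fun n => pvLabel n == "control")),
       ("data_processing", v5 ++ names.filter (fun n => pvLabel n == "data_processing")),
       ("interrupt_handling", v6 ++ names.filter (fun n => pvLabel n == "interrupt_handling")),
       ("utility", v7 ++ names.filter (fun n => pvLabel n == "utility"))] := by
  induction names generalizing v1 v2 v3 v4 v5 v6 v7 with
  | nil => simp
  | cons n names ih =>
    rw [List.foldl_cons, pvAStep_eq]
    rcases pvLabel_cases n with h | h | h | h | h | h | h <;>
      rw [h] <;>
      simp only [PySem.Dict.modify, PySem.Dict.insert, PySem.Dict.getD, PySem.Dict.get?] <;>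
      simp [h, ih]

-- generic: tagging each key with its bucket then dropping empties = B's filterMap
theorem pv_filter_filterMap (m : String → List String) (ks : List String) :
    (ks.map (fun k => (k, m k))).filter (fun kv => !kv.2.isEmpty) =
    ks.filterMap (fun k => if (m k).isEmpty then none else some (k, m k)) := by
  induction ks with
  | nil => rfl
  | cons k ks ih => by_cases h : m k = [] <;> simp [List.isEmpty_iff, h, ih]

-- ===== VERDICT (by name: the statement is the Claim_ definition above) =====
theorem group_functions_by_purpose_py_spec : Claim_equal_group_functions_by_purpose_py := by
  intro functions _
  unfold Spec_group_functions_by_purpose_py group_functions_by_purpose_py group_functions_by_purpose_py_alt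
  dsimp only
  rw [show PySem.Dict.ofList
      [("initialization", ([] : List String)), ("configuration", []), ("communication", []), ("control", []),
       ("data_processing", []), ("interrupt_handling", []), ("utility", [])] =
      PySem.Dict.mk
      [("initialization", []), ("configuration", []), ("communication", []), ("control", []),
       ("data_processing", []), ("interrupt_handling", []), ("utility", [])] from rfl, pv_fold_inv]
  have h := pv_filter_filterMap
    (fun k => List.filter (fun n => pvLabel n == k) (PySem.Dict.ofList functions).keys)
    ["initialization", "configuration", "communication", "control",
     "data_processing", "interrupt_handling", "utility"]
  simp only [List.map] at h
  simp only [pvRules, List.map, List.cons_append, List.nil_append]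
  exact h
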